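-- pv_equiv track=rewrite | github.com/daniel-reich/ubiquitous-fiesta | Kv8DMmwfuKTLyZD5E_1.py | make_dartboard
-- ===== SOURCE A (Python) =====
-- def entry(r,c):
--   return min(r,c) + 1
--
-- def convert(lst):
--   string = [str(el) for el in lst]
--   return ''.join(string)
--
-- def make_dartboard(n):
--   lst = [[entry(i,j) for j in range(0,n//2)] for i in range(0,n//2)]
--   for i in range(0,len(lst)):
--     lst[i].extend(lst[i][::-1])
--     if n % 2 == 1:
--       lst[i].insert(n//2,i+1)
--   lst.extend(lst[::-1])
--   if n % 2 == 1:
--     lst.insert(n//2,list(range(1,n//2 + 1)))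
--     lst[n//2].extend(list(range(1,n//2 + 1))[::-1])
--     lst[n//2].insert(n//2,n//2 + 1)
--   return list(map(lambda x: int(convert(x)),lst))
-- ===== SOURCE B (Python) =====
-- def make_dartboard(n):
--     # closed form: cell (i, j) is 1 + distance of (i, j) from the nearest board edge
--     return [int(''.join(str(min(i, n - 1 - i, j, n - 1 - j) + 1) for j in range(n)))
--             for i in range(n)]
-- ===== Notes on version B (the rewrite author's own statement) =====
-- stated objective: simpler
-- what changed: B replaces A's quarter-grid construction with horizontal/vertical mirroring and odd-n center-insertion special cases by one closed-form per-cell formula min(i, n-1-i, j, n-1-j) + 1 evaluated in a single comprehension.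
-- intended difference: For n = -1 A's negative-index inserts accidentally build a single [0] row and return [0], while B naturally returns [] (an empty board for nonpositive n), which is the intended value. — e.g. on make_dartboard(-1): A returns [0], B returns []
-- outside the precondition, e.g. on make_dartboard(-3): A raises IndexError, B returns []
import Mathlib
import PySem

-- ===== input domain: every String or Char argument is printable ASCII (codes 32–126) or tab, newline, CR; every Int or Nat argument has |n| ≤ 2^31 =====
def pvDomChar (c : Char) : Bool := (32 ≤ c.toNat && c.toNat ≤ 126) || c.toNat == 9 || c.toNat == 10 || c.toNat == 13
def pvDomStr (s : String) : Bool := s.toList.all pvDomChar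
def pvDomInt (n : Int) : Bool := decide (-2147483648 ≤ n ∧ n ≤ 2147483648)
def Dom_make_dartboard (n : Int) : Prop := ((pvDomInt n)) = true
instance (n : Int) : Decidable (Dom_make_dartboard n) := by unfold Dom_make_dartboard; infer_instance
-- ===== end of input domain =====

-- B replaces A's quarter-grid + mirror + odd-center-insert construction by the closed-form
-- per-cell value min(i, n-1-i, j, n-1-j) + 1; same rows-as-integers result (simpler decomposition).


-- ===== PORT A =====
-- entry(r, c)
def pvEntry (r c : Int) : Int := min r c + 1

-- convert(lst) = ''.join(str(el) for el in lst), kept on List Char (kernel-transparent strings)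
def pvConvert (lst : List Int) : List Char := PySem.Chars.join [] (lst.map PySem.Int.toChars)

-- lst[i] = f(lst[i]) with Python index resolution (negative index wraps; no-op where Python
-- would raise IndexError — those inputs are excluded by Pre_make_dartboard below)
def pvSetRow (l : List (List Int)) (i : Int) (f : List Int → List Int) : List (List Int) :=
  let k := if i < 0 then i + l.length else i
  if 0 ≤ k ∧ k < l.length then l.set k.toNat (f (l.getD k.toNat [])) else l

-- int(convert(x)); the joined digits always parse where A returns (rows are nonempty digit strings)
def pvRowInt (x : List Int) : Int := (PySem.Int.ofChars? (pvConvert x)).getD 0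

-- lst = [[entry(i,j) for j in range(0,n//2)] for i in range(0,n//2)]  (h = n//2)
def pvQuarter (h : Int) : List (List Int) :=
  (PySem.List.pyRange 0 h 1).map (fun i => (PySem.List.pyRange 0 h 1).map (fun j => pvEntry i j))

-- for i in range(0,len(lst)): lst[i].extend(lst[i][::-1]); if n % 2 == 1: lst[i].insert(n//2, i+1)
def pvLoop (n h : Int) (lst : List (List Int)) : List (List Int) :=
  (PySem.List.enumerate lst 0).map (fun p =>
    let row := p.2 ++ p.2.reverse
    if PySem.Int.mod n 2 = 1 then PySem.List.insert row h (p.1 + 1) else row)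

-- if n % 2 == 1: lst.insert(n//2, list(range(1,n//2+1))); lst[n//2].extend(...[::-1]); lst[n//2].insert(n//2, n//2+1)
def pvMiddle (n h : Int) (lst : List (List Int)) : List (List Int) :=
  if PySem.Int.mod n 2 = 1 then
    pvSetRow
      (pvSetRow (PySem.List.insert lst h (PySem.List.pyRange 1 (h+1) 1)) h
        (fun r => r ++ (PySem.List.pyRange 1 (h+1) 1).reverse)) h
      (fun r => PySem.List.insert r h (h + 1))
  else lst

def make_dartboard (n : Int) : List Int :=
  (pvMiddle n (PySem.Int.floordiv n 2)
    (pvLoop n (PySem.Int.floordiv n 2) (pvQuarter (PySem.Int.floordiv n 2))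
      ++ (pvLoop n (PySem.Int.floordiv n 2) (pvQuarter (PySem.Int.floordiv n 2))).reverse)).map
    pvRowInt

-- ===== PORT B =====
-- B's closed-form row i
def pvRowB (n i : Int) : List Int :=
  (PySem.List.pyRange 0 n 1).map (fun j => min (min i (n - 1 - i)) (min j (n - 1 - j)) + 1)

def make_dartboard_alt (n : Int) : List Int :=
  (PySem.List.pyRange 0 n 1).map (fun i =>
    (PySem.Int.ofChars? (PySem.Chars.join [] ((pvRowB n i).map PySem.Int.toChars))).getD 0)

-- ===== PRECONDITION & SPEC =====
-- Pre_ excludes exactly the odd n ≤ -3, on which A raises IndexError (lst[n//2] after the inserts).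
def Pre_make_dartboard (n : Int) : Prop := -1 ≤ n ∨ PySem.Int.mod n 2 = 0
instance (n : Int) : Decidable (Pre_make_dartboard n) := by unfold Pre_make_dartboard; infer_instance
def pvWitness_make_dartboard : Int := 5

-- For n = -1 A's negative-index inserts accidentally build a single [0] row and return [0];
-- B returns [] (the empty board for nonpositive n), which is the intended value.
def D_make_dartboard (n : Int) : Prop := n = -1
instance (n : Int) : Decidable (D_make_dartboard n) := by unfold D_make_dartboard; infer_instance
def Spec_make_dartboard (n : Int) (out : List Int) : Prop := ¬ D_make_dartboard n → out = make_dartboard_alt n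
instance (n : Int) (out : List Int) : Decidable (Spec_make_dartboard n out) := by unfold Spec_make_dartboard; infer_instance
def pvDiffWitness_make_dartboard : Int := -1
def pvDiffWitnessOut_make_dartboard : (List Int) × (List Int) := ([0], [])

-- ===== CLAIM (what is proved, stated in full; the proofs are below) =====
def Claim_unchanged_make_dartboard : Prop := ∀ (n : Int), Dom_make_dartboard n → Pre_make_dartboard n → Spec_make_dartboard n (make_dartboard n)
def Claim_changed_make_dartboard : Prop := Dom_make_dartboard (pvDiffWitness_make_dartboard) ∧ Pre_make_dartboard (pvDiffWitness_make_dartboard) ∧ D_make_dartboard (pvDiffWitness_make_dartboard) ∧ make_dartboard (pvDiffWitness_make_dartboard) = pvDiffWitnessOut_make_dartboard.1 ∧ make_dartboard_alt (pvDiffWitness_make_dartboard) = pvDiffWitnessOut_make_dartboard.2 ∧ pvDiffWitnessOut_make_dartboard.1 ≠ pvDiffWitnessOut_make_dartboard.2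
def Claim_exact_make_dartboard : Prop := ∀ (n : Int), Dom_make_dartboard n → Pre_make_dartboard n → D_make_dartboard n → make_dartboard n ≠ make_dartboard_alt n

-- ===== LEMMAS AND PROOFS =====

lemma pyRange_nat (m : Nat) : PySem.List.pyRange 0 (m:Int) 1 = (List.range m).map (fun (j:Nat) => (j:Int)) := by
  rw [PySem.List.pyRange_one]
  simp only [sub_zero, Int.toNat_natCast, zero_add]

lemma pyRange_one_nat (k : Nat) : PySem.List.pyRange 1 ((k:Int)+1) 1 = (List.range k).map (fun (j:Nat) => (j:Int)+1) := by
  rw [PySem.List.pyRange_one]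
  norm_num
  intro a _
  omega

lemma pvRangeSplit {α : Type} (k c : Nat) (hc : c ≤ 1) (g : Nat → α) :
    (List.range (2*k+c)).map g
      = (List.range k).map g ++ (if c = 1 then [g k] else [])
        ++ ((List.range k).map (fun j => g (2*k+c-1-j))).reverse := by
  have h1 : ((List.range k).map (fun j => g (2*k+c-1-j))).reverse
      = (List.range' (k+c) k).map g := by
    rw [← List.map_reverse, List.range_eq_range', List.reverse_range', List.map_map,
        List.range'_eq_map_range, List.map_map]
    exact List.map_congr_left (fun j hj => by
      simp only [List.mem_range] at hj
      simp only [Function.comp]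
      congr 1
      omega)
  have h2 : (if c = 1 then [g k] else []) = (List.range' k c).map g := by
    interval_cases c <;> simp
  have h3 : List.range' 0 k ++ List.range' k c ++ List.range' (k+c) k = List.range' 0 (2*k+c) := by
    have a1 : List.range' 0 k ++ List.range' (0+k) c = List.range' 0 (k+c) := List.range'_append_1
    have a2 : List.range' 0 (k+c) ++ List.range' (0+(k+c)) k = List.range' 0 ((k+c)+k) := List.range'_append_1
    simp only [Nat.zero_add] at a1 a2
    rw [a1, a2]
    congr 1
    omega
  rw [h1, h2, List.range_eq_range' (n := k), ← List.map_append, ← List.map_append, h3,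
      ← List.range_eq_range']

lemma set_append_len {a : Type} (Q R : List a) (x v : a) :
    (Q ++ x :: R).set Q.length v = Q ++ v :: R := by
  induction Q with
  | nil => rfl
  | cons q t ih => simp [ih]

lemma getD_append_len {a : Type} (Q R : List a) (x d : a) :
    (Q ++ x :: R).getD Q.length d = x := by
  induction Q with
  | nil => rfl
  | cons q t ih => simp only [List.cons_append]; exact ih

lemma enum_map_range {a : Type} (t : Nat) (f : Nat → a) :
    PySem.List.enumerate ((List.range t).map f) 0 = (List.range t).map (fun (j:Nat) => ((j:Int), f j)) := by
  apply List.ext_getElem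
  · simp [PySem.List.length_enumerate]
  · intro i h1 h2
    simp [PySem.List.getElem_enumerate]

lemma pvSetRow_append (Q R : List (List Int)) (x : List Int) (f : List Int → List Int) :
    pvSetRow (Q ++ x :: R) (Q.length : Int) f = Q ++ f x :: R := by
  unfold pvSetRow
  have h0 : ¬ ((Q.length : Int) < 0) := by omega
  rw [if_neg h0]
  rw [if_pos (by refine ⟨by omega, ?_⟩; simp)]
  simp only [Int.toNat_natCast]
  rw [getD_append_len, set_append_len]

lemma take_len_append {a : Type} (M N : List a) (k : Nat) (hk : M.length = k) :
    (M ++ N).take k = M := by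
  subst hk; exact List.take_left

lemma drop_len_append {a : Type} (M N : List a) (k : Nat) (hk : M.length = k) :
    (M ++ N).drop k = N := by
  subst hk; exact List.drop_left

lemma pvSetRow_nat (Q R : List (List Int)) (x : List Int) (f : List Int → List Int)
    (k : Nat) (hk : Q.length = k) :
    pvSetRow (Q ++ x :: R) (k : Int) f = Q ++ f x :: R := by
  subst hk; exact pvSetRow_append Q R x f

-- symmetry of B's row in the row index
lemma rowB_symm (n i : Int) : pvRowB n (n-1-i) = pvRowB n i := by
  unfold pvRowB
  apply List.map_congr_left
  intro j _
  have h : n - 1 - (n - 1 - i) = i := by ring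
  rw [h, min_comm (n-1-i) i]

-- B's row for a row index below the middle
lemma rowB_lower (k c : Nat) (hc : c ≤ 1) (i : Int) (hik : i < (k:Int)) :
    pvRowB ((2*k+c : Nat) : Int) i
      = (List.range k).map (fun (j:Nat) => min i (j:Int) + 1)
        ++ (if c = 1 then [i+1] else [])
        ++ ((List.range k).map (fun (j:Nat) => min i (j:Int) + 1)).reverse := by
  unfold pvRowB
  rw [pyRange_nat, List.map_map, pvRangeSplit k c hc]
  congr 1
  · congr 1
    · apply List.map_congr_left
      intro j hj
      simp only [List.mem_range] at hj
      simp only [Function.comp]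
      rw [min_eq_left (by push_cast; omega : i ≤ ((2*k+c:Nat):Int) - 1 - i),
          min_eq_left (by push_cast; omega : ((j:Int)) ≤ ((2*k+c:Nat):Int) - 1 - (j:Int))]
    · interval_cases c
      · simp
      · simp only [if_true, Function.comp_apply]
        rw [min_eq_left (by push_cast; omega : i ≤ ((2*k+1:Nat):Int) - 1 - i),
            min_eq_left (by push_cast; omega : ((k:Int)) ≤ ((2*k+1:Nat):Int) - 1 - (k:Int)),
            min_eq_left (le_of_lt hik)]
  · congr 1
    apply List.map_congr_left
    intro j hj
    simp only [List.mem_range] at hj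
    simp only [Function.comp]
    have e1 : ((2*k+c-1-j : Nat) : Int) = ((2*k+c:Nat):Int) - 1 - (j:Int) := by omega
    have e2 : ((2*k+c:Nat):Int) - 1 - (((2*k+c:Nat):Int) - 1 - (j:Int)) = (j:Int) := by ring
    rw [e1, e2, min_eq_left (by push_cast; omega : i ≤ ((2*k+c:Nat):Int) - 1 - i),
        min_eq_right (by push_cast; omega : ((j:Int)) ≤ ((2*k+c:Nat):Int) - 1 - (j:Int))]

-- the quarter rows after A's for-loop are exactly B's upper rows
lemma loop_eq (k c : Nat) (hc : c ≤ 1) :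
    pvLoop ((2*k+c:Nat):Int) (k:Int) (pvQuarter (k:Int))
      = (List.range k).map (fun (i:Nat) => pvRowB ((2*k+c:Nat):Int) (i:Int)) := by
  have hmod : PySem.Int.mod ((2*k+c:Nat):Int) 2 = (((2*k+c) % 2 : Nat):Int) := by
    exact_mod_cast PySem.Int.mod_natCast (2*k+c) 2
  unfold pvLoop pvQuarter
  rw [pyRange_nat, List.map_map, enum_map_range, List.map_map]
  apply List.map_congr_left
  intro i hi
  simp only [List.mem_range] at hi
  simp only [Function.comp]
  rw [rowB_lower k c hc (i:Int) (by exact_mod_cast hi)]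
  have hQ2 : List.map (fun j => pvEntry (i:Int) j) ((List.range k).map (fun (j:Nat) => (j:Int)))
      = (List.range k).map (fun (j:Nat) => min (i:Int) (j:Int) + 1) := by
    rw [List.map_map]; rfl
  rw [hQ2]
  have hQlen : ((List.range k).map (fun (j:Nat) => min (i:Int) (j:Int) + 1)).length = k := by simp
  interval_cases c
  · rw [if_neg (by rw [hmod]; omega)]
    simp
  · rw [if_pos (by rw [hmod]; norm_num)]
    rw [PySem.List.insert_natCast _ k _ (by simp)]
    rw [take_len_append _ _ k hQlen, drop_len_append _ _ k hQlen]
    simp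

-- A's synthesised middle row is B's middle row (odd n)
lemma middle_row (k : Nat) :
    PySem.List.insert
        (PySem.List.pyRange 1 ((k:Int)+1) 1 ++ (PySem.List.pyRange 1 ((k:Int)+1) 1).reverse)
        (k:Int) ((k:Int)+1)
      = pvRowB ((2*k+1:Nat):Int) (k:Int) := by
  rw [pyRange_one_nat]
  have hlen : ((List.range k).map (fun (j:Nat) => (j:Int)+1)).length = k := by simp
  rw [PySem.List.insert_natCast _ k _ (by simp)]
  rw [take_len_append _ _ k hlen, drop_len_append _ _ k hlen]
  unfold pvRowB
  rw [pyRange_nat, List.map_map, pvRangeSplit k 1 (le_refl 1), List.append_assoc]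
  symm
  congr 1
  · apply List.map_congr_left
    intro j hj
    simp only [List.mem_range] at hj
    simp only [Function.comp]
    rw [min_eq_left (by push_cast; omega : ((k:Int)) ≤ ((2*k+1:Nat):Int) - 1 - (k:Int)),
        min_eq_left (by push_cast; omega : ((j:Int)) ≤ ((2*k+1:Nat):Int) - 1 - (j:Int)),
        min_eq_right (by omega : ((j:Int)) ≤ (k:Int))]
  · rw [if_pos rfl, List.singleton_append]
    congr 1
    · simp only [Function.comp_apply]
      rw [min_eq_left (by push_cast; omega : ((k:Int)) ≤ ((2*k+1:Nat):Int) - 1 - (k:Int)),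
          min_self]
    · congr 1
      apply List.map_congr_left
      intro j hj
      simp only [List.mem_range] at hj
      simp only [Function.comp]
      have e1 : ((2*k+1-1-j : Nat) : Int) = ((2*k+1:Nat):Int) - 1 - (j:Int) := by omega
      have e2 : ((2*k+1:Nat):Int) - 1 - (((2*k+1:Nat):Int) - 1 - (j:Int)) = (j:Int) := by ring
      rw [e1, e2,
          min_eq_left (by push_cast; omega : ((k:Int)) ≤ ((2*k+1:Nat):Int) - 1 - (k:Int)),
          min_eq_right (by push_cast; omega : ((j:Int)) ≤ ((2*k+1:Nat):Int) - 1 - (j:Int)),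
          min_eq_right (by omega : ((j:Int)) ≤ (k:Int))]

-- B's grid split into top half, middle, bottom half
lemma grid_eq (k c : Nat) (hc : c ≤ 1) :
    (PySem.List.pyRange 0 ((2*k+c:Nat):Int) 1).map (pvRowB ((2*k+c:Nat):Int))
      = (List.range k).map (fun (i:Nat) => pvRowB ((2*k+c:Nat):Int) (i:Int))
        ++ (if c = 1 then [pvRowB ((2*k+c:Nat):Int) (k:Int)] else [])
        ++ ((List.range k).map (fun (i:Nat) => pvRowB ((2*k+c:Nat):Int) (i:Int))).reverse := by
  rw [pyRange_nat, List.map_map, pvRangeSplit k c hc]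
  congr 1
  congr 1
  apply List.map_congr_left
  intro j hj
  simp only [List.mem_range] at hj
  simp only [Function.comp]
  have e1 : ((2*k+c-1-j : Nat) : Int) = ((2*k+c:Nat):Int) - 1 - (j:Int) := by omega
  rw [e1, rowB_symm]

lemma alt_eq (n : Int) :
    make_dartboard_alt n = ((PySem.List.pyRange 0 n 1).map (pvRowB n)).map pvRowInt := by
  unfold make_dartboard_alt pvRowInt pvConvert
  rw [List.map_map]
  rfl

theorem main_lemma : ∀ (n : Int), Dom_make_dartboard n → Pre_make_dartboard n → ¬ D_make_dartboard n → make_dartboard n = make_dartboard_alt n := by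
  intro n _ hp hnd
  rcases lt_or_ge n 0 with hneg | hpos
  · -- n < 0 and n ≠ -1, so n is even: both boards are empty
    have hmod0 : PySem.Int.mod n 2 = 0 := by
      rcases hp with h | h
      · exact absurd (by omega : n = -1) hnd
      · exact h
    have hfdneg : PySem.Int.floordiv n 2 ≤ 0 := by
      rw [PySem.Int.floordiv_eq_ediv_of_pos (by norm_num)]
      omega
    unfold make_dartboard make_dartboard_alt pvMiddle pvLoop pvQuarter
    rw [PySem.List.pyRange_one_eq_nil hfdneg, PySem.List.pyRange_one_eq_nil (by omega : n ≤ 0),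
        hmod0]
    simp [PySem.List.enumerate_nil]
  · obtain ⟨m, rfl⟩ : ∃ m : Nat, n = (m:Int) := ⟨n.toNat, (Int.toNat_of_nonneg hpos).symm⟩
    obtain ⟨k, c, hc, rfl⟩ : ∃ k c, c ≤ 1 ∧ m = 2*k+c := ⟨m/2, m%2, by omega, by omega⟩
    have hfd : PySem.Int.floordiv ((2*k+c:Nat):Int) 2 = (k:Int) := by
      have h1 : PySem.Int.floordiv ((2*k+c:Nat):Int) 2 = (((2*k+c)/2 : Nat):Int) := by
        exact_mod_cast PySem.Int.floordiv_natCast (2*k+c) 2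
      rw [h1]; congr 1; omega
    have hmod : PySem.Int.mod ((2*k+c:Nat):Int) 2 = (((2*k+c) % 2 : Nat):Int) := by
      exact_mod_cast PySem.Int.mod_natCast (2*k+c) 2
    rw [alt_eq]
    unfold make_dartboard pvMiddle
    rw [hfd, hmod, loop_eq k c hc, grid_eq k c hc]
    have hRlen : ((List.range k).map (fun (i:Nat) => pvRowB ((2*k+c:Nat):Int) (i:Int))).length = k := by
      simp
    interval_cases c
    · rw [if_neg (by omega)]
      simp
    · rw [if_pos (by norm_num)]
      rw [PySem.List.insert_natCast _ k _ (by simp)]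
      rw [take_len_append _ _ k hRlen, drop_len_append _ _ k hRlen,
          pvSetRow_nat _ _ _ _ k hRlen, pvSetRow_nat _ _ _ _ k hRlen, middle_row]
      simp

-- ===== VERDICT (by name: the statement is the Claim_ definition above) =====
theorem make_dartboard_spec : Claim_unchanged_make_dartboard := by
  intro n hd hp hnd; exact main_lemma n hd hp hnd

theorem make_dartboard_changed : Claim_changed_make_dartboard := by
  unfold Claim_changed_make_dartboard; decide

theorem make_dartboard_tight : Claim_exact_make_dartboard := by
  intro n _ _ hD
  unfold D_make_dartboard at hD; subst hD; decide
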